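-- pv_equiv track=rewrite | github.com/Daylily-Informatics/whats-up-doc | src/seqmeta/inference.py | classify_index_type
-- ===== SOURCE A (Python) =====
-- from typing import Dict, Iterable, List, Optional
--
-- def classify_index_type(index_sequences: Iterable[str]) -> str:
--     unique_indexes = {index for index in index_sequences if index}
--     if not unique_indexes:
--         return "none"
--     contains_dual = any("+" in index for index in unique_indexes)
--     if contains_dual:
--         return "dual"
--     return "single"
-- ===== SOURCE B (Python) =====
-- def classify_index_type(index_sequences):
--     seen = False
--     for index in index_sequences:
--         if index:
--             if "+" in index:
--                 return "dual"
--             seen = True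
--     return "single" if seen else "none"
-- ===== Notes on version B (the rewrite author's own statement) =====
-- stated objective: simpler
-- what changed: Replaced the set comprehension plus two separate scans (emptiness test and any()) by one fused single pass with a seen flag and early exit on the first '+'-containing index, never materializing a set.
import Mathlib
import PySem

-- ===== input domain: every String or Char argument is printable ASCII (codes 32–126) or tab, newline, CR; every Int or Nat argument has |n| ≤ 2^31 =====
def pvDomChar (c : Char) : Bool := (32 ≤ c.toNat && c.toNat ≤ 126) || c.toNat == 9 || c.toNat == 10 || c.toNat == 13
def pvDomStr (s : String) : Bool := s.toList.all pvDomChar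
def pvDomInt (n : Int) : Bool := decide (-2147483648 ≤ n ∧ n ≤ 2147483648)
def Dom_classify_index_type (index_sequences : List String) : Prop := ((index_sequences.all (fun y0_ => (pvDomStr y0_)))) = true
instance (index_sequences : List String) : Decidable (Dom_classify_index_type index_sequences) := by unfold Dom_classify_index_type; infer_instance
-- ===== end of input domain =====

-- B replaces A's set comprehension plus two separate scans by one fused single pass
-- with a seen flag and early exit ("simpler"); return value is identical on all inputs.

-- ===== PORT A =====
def classify_index_type (index_sequences : List String) : String :=
  let unique_indexes := PySem.Set.ofList (index_sequences.filter (fun index => !(index == "")))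
  if unique_indexes = [] then "none"
  else
    let contains_dual := unique_indexes.any (fun index => PySem.Str.isIn "+" index)
    if contains_dual then "dual" else "single"

-- ===== PORT B =====
def classify_index_type_alt_loop (rest : List String) (seen : Bool) : String :=
  match rest with
  | [] => if seen then "single" else "none"
  | index :: rest =>
    if !(index == "") then
      if PySem.Str.isIn "+" index then "dual"
      else classify_index_type_alt_loop rest true
    else classify_index_type_alt_loop rest seen

def classify_index_type_alt (index_sequences : List String) : String :=
  classify_index_type_alt_loop index_sequences false

-- ===== PRECONDITION & SPEC =====
def Spec_classify_index_type (index_sequences : List String) (out : String) : Prop := out = classify_index_type_alt index_sequences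
instance (index_sequences : List String) (out : String) : Decidable (Spec_classify_index_type index_sequences out) := by unfold Spec_classify_index_type; infer_instance

-- ===== CLAIM (what is proved, stated in full; the proofs are below) =====
def Claim_equal_classify_index_type : Prop := ∀ (index_sequences : List String), Dom_classify_index_type index_sequences → Spec_classify_index_type index_sequences (classify_index_type index_sequences)

-- ===== LEMMAS AND PROOFS =====

-- canonical form both programs compute
def pvSpecForm (xs : List String) : String :=
  if xs.any (fun i => !(i == "") && PySem.Str.isIn "+" i) then "dual"
  else if xs.any (fun i => !(i == "")) then "single" else "none"

theorem a_eq_spec (xs : List String) : classify_index_type xs = pvSpecForm xs := by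
  unfold classify_index_type pvSpecForm
  have hmem : ∀ i : String,
      i ∈ PySem.Set.ofList (xs.filter (fun index => !(index == ""))) ↔
        i ∈ xs ∧ (!(i == "")) = true := by
    intro i; rw [PySem.Set.mem_ofList, List.mem_filter]
  by_cases hd : ∃ i ∈ xs, (!(i == "")) = true ∧ PySem.Str.isIn "+" i = true
  · obtain ⟨i, hi, hne, hp⟩ := hd
    rw [if_neg, if_pos, if_pos (List.any_eq_true.mpr ⟨i, hi, by simp only [hne, Bool.true_and]; exact hp⟩)]
    · exact List.any_eq_true.mpr ⟨i, (hmem i).mpr ⟨hi, hne⟩, hp⟩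
    · intro h
      exact (List.eq_nil_iff_forall_not_mem.mp h) i ((hmem i).mpr ⟨hi, hne⟩)
  · have hd' : ¬ (xs.any (fun i => !(i == "") && PySem.Str.isIn "+" i) = true) := by
      intro h
      obtain ⟨i, hi, hb⟩ := List.any_eq_true.mp h
      rw [Bool.and_eq_true] at hb
      exact hd ⟨i, hi, hb.1, hb.2⟩
    rw [if_neg hd']
    by_cases hne : ∃ i ∈ xs, (!(i == "")) = true
    · obtain ⟨i, hi, hnei⟩ := hne
      rw [if_neg, if_neg, if_pos (List.any_eq_true.mpr ⟨i, hi, hnei⟩)]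
      · intro h
        obtain ⟨j, hj, hpj⟩ := List.any_eq_true.mp h
        obtain ⟨hjx, hjne⟩ := (hmem j).mp hj
        exact hd ⟨j, hjx, hjne, hpj⟩
      · intro h
        exact (List.eq_nil_iff_forall_not_mem.mp h) i ((hmem i).mpr ⟨hi, hnei⟩)
    · rw [if_pos, if_neg]
      · intro h
        obtain ⟨i, hi, hb⟩ := List.any_eq_true.mp h
        exact hne ⟨i, hi, hb⟩
      · rw [List.eq_nil_iff_forall_not_mem]
        intro i hi
        obtain ⟨hix, hine⟩ := (hmem i).mp hi
        exact hne ⟨i, hix, hine⟩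

theorem b_loop_eq_spec (xs : List String) (seen : Bool) :
    classify_index_type_alt_loop xs seen =
      (if xs.any (fun i => !(i == "") && PySem.Str.isIn "+" i) then "dual"
       else if seen || xs.any (fun i => !(i == "")) then "single" else "none") := by
  induction xs generalizing seen with
  | nil => simp [classify_index_type_alt_loop]
  | cons i rest ih =>
    simp only [classify_index_type_alt_loop, List.any_cons]
    by_cases h0 : (!(i == "")) = true
    · rw [if_pos h0]
      by_cases hp : PySem.Str.isIn "+" i = true
      · have hp' : PySem.Chars.isIn ['+'] i.toList = true := hp
        simp [hp', h0]
      · simp only [Bool.not_eq_true] at hp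
        have hp' : PySem.Chars.isIn ['+'] i.toList = false := hp
        rw [ih]
        simp [hp', h0]
    · simp only [Bool.not_eq_true] at h0 ⊢
      rw [if_neg (by simp [h0]), ih]
      simp [h0]

theorem b_eq_spec (xs : List String) : classify_index_type_alt xs = pvSpecForm xs := by
  unfold classify_index_type_alt pvSpecForm
  rw [b_loop_eq_spec]
  simp

-- ===== VERDICT (by name: the statement is the Claim_ definition above) =====
theorem classify_index_type_spec : Claim_equal_classify_index_type := by
  intro xs _
  unfold Spec_classify_index_type
  rw [a_eq_spec, b_eq_spec]
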